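-- pv_equiv track=rewrite | github.com/KhalilSantana/Mestrado-PSD-T4 | script.py | format_binary_sequence
-- ===== SOURCE A (Python) =====
-- def format_binary_sequence(binary_sequence):
--     formatted_sequence = ''
--     for i, bit in enumerate(binary_sequence, 1):
--         formatted_sequence += bit
--         if i % 4 == 0 and i % 8 != 0:
--             formatted_sequence += '_'
--         elif i % 8 == 0:
--             formatted_sequence += '|'
--     return formatted_sequence
-- ===== SOURCE B (Python) =====
-- def format_binary_sequence(binary_sequence):
--     out = []
--     rest = binary_sequence
--     g = 0
--     while rest:
--         chunk = rest[:4]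
--         out.append(chunk)
--         if len(chunk) == 4:
--             out.append('_' if g % 2 == 0 else '|')
--         rest = rest[4:]
--         g += 1
--     return ''.join(out)
-- ===== Notes on version B (the rewrite author's own statement) =====
-- stated objective: alternative
-- what changed: Replaces the per-character loop with a 1-based counter and i%4/i%8 tests by a loop that peels one 4-character chunk at a time, appending the whole chunk and choosing the separator ('_' vs '|') from the parity of the 0-based chunk counter; short final chunks get no separator.
import Mathlib
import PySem

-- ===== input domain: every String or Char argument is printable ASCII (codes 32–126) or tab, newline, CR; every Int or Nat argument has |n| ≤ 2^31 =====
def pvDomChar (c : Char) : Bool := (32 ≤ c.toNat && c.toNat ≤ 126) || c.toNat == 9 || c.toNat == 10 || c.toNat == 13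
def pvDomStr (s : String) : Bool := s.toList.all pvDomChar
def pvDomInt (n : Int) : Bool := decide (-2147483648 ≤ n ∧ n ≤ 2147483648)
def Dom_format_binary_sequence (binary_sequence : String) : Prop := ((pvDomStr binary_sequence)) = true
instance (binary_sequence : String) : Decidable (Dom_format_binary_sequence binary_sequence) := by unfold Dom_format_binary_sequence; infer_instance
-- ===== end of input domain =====

-- B replaces A's per-character counter with i%4/i%8 tests by a recursion over
-- 4-character chunks choosing the separator from the chunk-index parity (alternative decomposition).

-- ===== PORT A =====
-- A's loop over the characters, carrying the 1-based enumerate index i and the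
-- accumulated characters (strings ported as List Char, result rebuilt with String.ofList)
def formatLoopA : List Char → Nat → List Char → List Char
  | [], _, acc => acc
  | bit :: rest, i, acc =>
    let acc1 := acc ++ [bit]
    let acc2 :=
      if i % 4 = 0 ∧ ¬ i % 8 = 0 then acc1 ++ ['_']
      else if i % 8 = 0 then acc1 ++ ['|']
      else acc1
    formatLoopA rest (i + 1) acc2

def format_binary_sequence (binary_sequence : String) : String :=
  String.ofList (formatLoopA binary_sequence.toList 1 [])

-- ===== PORT B =====
-- Source B's while loop peeling rest[:4] / rest[4:] (nonnegative slices = take 4 / drop 4, exact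
-- here), ported as the obvious structural recursion on the remainder with the group counter g
def chunksB : List Char → Nat → List Char
  | [], _ => []
  | c :: cs, g =>
    let chunk := (c :: cs).take 4
    let sep : List Char := if chunk.length < 4 then [] else if g % 2 = 0 then ['_'] else ['|']
    chunk ++ sep ++ chunksB ((c :: cs).drop 4) (g + 1)
termination_by l _ => l.length
decreasing_by simp [List.length_drop]

def format_binary_sequence_alt (binary_sequence : String) : String :=
  String.ofList (chunksB binary_sequence.toList 0)

-- ===== PRECONDITION & SPEC =====
def Spec_format_binary_sequence (binary_sequence : String) (out : String) : Prop := out = format_binary_sequence_alt binary_sequence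
instance (binary_sequence : String) (out : String) : Decidable (Spec_format_binary_sequence binary_sequence out) := by unfold Spec_format_binary_sequence; infer_instance

-- ===== CLAIM (what is proved, stated in full; the proofs are below) =====
def Claim_equal_format_binary_sequence : Prop := ∀ (binary_sequence : String), Dom_format_binary_sequence binary_sequence → Spec_format_binary_sequence binary_sequence (format_binary_sequence binary_sequence)

-- ===== LEMMAS AND PROOFS =====

theorem chunksB_nil (g : Nat) : chunksB [] g = [] := by
  rw [chunksB]

theorem chunksB_cons (c : Char) (cs : List Char) (g : Nat) :
    chunksB (c :: cs) g =
      (c :: cs).take 4 ++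
        (if ((c :: cs).take 4).length < 4 then ([] : List Char)
         else if g % 2 = 0 then ['_'] else ['|']) ++
        chunksB ((c :: cs).drop 4) (g + 1) := by
  rw [chunksB]

-- A's loop started at index 4*m+1 produces acc ++ (B's chunks from group m)
theorem formatLoopA_eq_chunksB (n : Nat) :
    ∀ (l : List Char) (m : Nat) (acc : List Char), l.length ≤ n →
      formatLoopA l (4 * m + 1) acc = acc ++ chunksB l m := by
  induction n with
  | zero =>
    intro l m acc h
    have : l = [] := List.length_eq_zero_iff.mp (Nat.le_zero.mp h)
    subst this
    simp [formatLoopA, chunksB_nil]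
  | succ n ih =>
    intro l m acc h
    have h1 : ¬ (4 * m + 1) % 4 = 0 := by omega
    have h1' : ¬ (4 * m + 1) % 8 = 0 := by omega
    have h2 : ¬ (4 * m + 1 + 1) % 4 = 0 := by omega
    have h2' : ¬ (4 * m + 1 + 1) % 8 = 0 := by omega
    have h3 : ¬ (4 * m + 1 + 1 + 1) % 4 = 0 := by omega
    have h3' : ¬ (4 * m + 1 + 1 + 1) % 8 = 0 := by omega
    match l with
    | [] => simp [formatLoopA, chunksB_nil]
    | [a] => simp [formatLoopA, chunksB_cons, chunksB_nil, h1, h1']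
    | [a, b] => simp [formatLoopA, chunksB_cons, chunksB_nil, h1, h1', h2, h2']
    | [a, b, c] => simp [formatLoopA, chunksB_cons, chunksB_nil, h1, h1', h2, h2', h3, h3']
    | a :: b :: c :: d :: rest =>
      have h4 : (4 * m + 1 + 1 + 1 + 1) % 4 = 0 := by omega
      have hrest : rest.length ≤ n := by
        simp at h; omega
      have hstep : 4 * m + 1 + 1 + 1 + 1 + 1 = 4 * (m + 1) + 1 := by omega
      rcases Nat.even_or_odd m with hm | hm
      · obtain ⟨k, hk⟩ := hm
        have h4' : ¬ (4 * m + 1 + 1 + 1 + 1) % 8 = 0 := by omega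
        have hg : m % 2 = 0 := by omega
        simp only [formatLoopA, h1, h1', h2, h2', h3, h3', h4, h4', hstep,
          not_false_eq_true, and_true, false_and, if_true, if_false]
        rw [ih rest (m + 1) _ hrest, chunksB_cons]
        simp [hg]
      · obtain ⟨k, hk⟩ := hm
        have h4' : (4 * m + 1 + 1 + 1 + 1) % 8 = 0 := by omega
        have hg : ¬ m % 2 = 0 := by omega
        simp only [formatLoopA, h1, h1', h2, h2', h3, h3', h4, h4', hstep,
          not_false_eq_true, and_true, false_and, if_true, if_false]
        rw [ih rest (m + 1) _ hrest, chunksB_cons]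
        simp [hg]

-- ===== VERDICT (by name: the statement is the Claim_ definition above) =====
theorem format_binary_sequence_spec : Claim_equal_format_binary_sequence := by
  intro s _
  unfold Spec_format_binary_sequence format_binary_sequence format_binary_sequence_alt
  have h := formatLoopA_eq_chunksB s.toList.length s.toList 0 [] (le_refl _)
  simp only [List.nil_append] at h
  exact congrArg String.ofList h
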